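-- pv_equiv track=rewrite | github.com/prosyslab/unitcon | script/inheritance_info_parser.py | remove_generic
-- ===== SOURCE A (Python) =====
-- def remove_generic(name):
--     rename = name
--     index_stack = []
--     for i in range(len(name)):
--         if name[i] == '<':
--             index_stack.append(i)
--         elif name[i] == '>':
--             prev_brk = index_stack.pop()
--             add_space = ' ' * (i + 1 - prev_brk)
--             rename = rename[0:prev_brk] + add_space + rename[i + 1:]
--     return rename
-- ===== SOURCE B (Python) =====
-- def remove_generic(name):
--     n = len(name)
--     mark = [False] * n
--     stack = []
--     for i in range(n):
--         c = name[i]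
--         if c == '<':
--             stack.append(i)
--         elif c == '>' and stack:
--             mark[stack.pop()] = True
--             mark[i] = True
--     out = []
--     depth = 0
--     for i in range(n):
--         c = name[i]
--         if mark[i]:
--             if c == '<':
--                 depth += 1
--             else:
--                 depth -= 1
--             out.append(' ')
--         else:
--             out.append(' ' if depth > 0 else c)
--     return ''.join(out)
-- ===== Notes on version B (the rewrite author's own statement) =====
-- stated objective: alternative
-- what changed: Instead of splicing a fresh full-length string on every '>' as A does, B marks the matched bracket positions in one pass and then emits each output character once, blanking characters that are marked or lie at positive bracket depth.
import Mathlib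
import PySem

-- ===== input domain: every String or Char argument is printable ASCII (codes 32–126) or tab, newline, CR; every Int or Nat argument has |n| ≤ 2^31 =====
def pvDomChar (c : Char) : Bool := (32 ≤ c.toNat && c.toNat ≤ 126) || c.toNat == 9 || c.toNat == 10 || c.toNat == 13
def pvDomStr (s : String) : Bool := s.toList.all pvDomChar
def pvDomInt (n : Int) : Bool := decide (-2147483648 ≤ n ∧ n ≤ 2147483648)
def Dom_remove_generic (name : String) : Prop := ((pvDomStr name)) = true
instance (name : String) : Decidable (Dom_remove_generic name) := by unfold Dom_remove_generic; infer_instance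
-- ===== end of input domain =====

-- B replaces A's per-'>' full-string splicing by a mark-the-matched-brackets pass plus a single emit pass
-- (an alternative one-touch-per-character algorithm); equivalence is proved on Pre_, the inputs where A's
-- stack pop succeeds (A raises IndexError elsewhere).

-- ===== PORT A =====
-- A's loop body: stack held with head = top (Python appends/pops at the end);
-- rename[0:prev] / rename[i+1:] are nonnegative in-range slices = take / drop.
def stepA (s : List Char) (acc : List Char × List Nat) (i : Nat) : List Char × List Nat :=
  if s.getD i ' ' = '<' then (acc.1, i :: acc.2)
  else if s.getD i ' ' = '>' then
    match acc.2 with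
    | prev :: rest =>
        (acc.1.take prev ++ List.replicate (i + 1 - prev) ' ' ++ acc.1.drop (i + 1), rest)
    | [] => acc  -- Python raises IndexError here (pop from empty list); excluded by Pre_
  else acc

def remove_generic (name : String) : String :=
  let s := name.toList
  let r := (List.range s.length).foldl (stepA s) (s, [])
  String.mk r.1

-- ===== PORT B =====
-- pass 1 of Source B: push '<' positions, on '>' with nonempty stack mark both ends of the matched pair
def stepB1 (s : List Char) (acc : List Nat × List Bool) (i : Nat) : List Nat × List Bool :=
  if s.getD i ' ' = '<' then (i :: acc.1, acc.2)
  else if s.getD i ' ' = '>' then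
    match acc.1 with
    | j :: rest => (rest, (acc.2.set j true).set i true)
    | [] => acc
  else acc

-- pass 2 of Source B: emit each character once, tracking bracket depth over the marked positions
def stepB2 (s : List Char) (mark : List Bool) (acc : Int × List Char) (i : Nat) : Int × List Char :=
  if mark.getD i false then
    (if s.getD i ' ' = '<' then (acc.1 + 1, acc.2 ++ [' ']) else (acc.1 - 1, acc.2 ++ [' ']))
  else (acc.1, acc.2 ++ [if 0 < acc.1 then ' ' else s.getD i ' '])

def remove_generic_alt (name : String) : String :=
  let s := name.toList
  let p := (List.range s.length).foldl (stepB1 s) ([], List.replicate s.length false)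
  let r := (List.range s.length).foldl (stepB2 s p.2) (0, [])
  String.mk r.2

-- ===== PRECONDITION & SPEC =====
-- Pre_: every prefix has at least as many '<' as '>', i.e. A's index_stack.pop() never
-- hits an empty stack (Python IndexError); exactly the inputs where A returns normally.
def Pre_remove_generic (name : String) : Prop :=
  ∀ i ∈ List.range (name.toList.length + 1),
    (name.toList.take i).count '>' ≤ (name.toList.take i).count '<'

instance (name : String) : Decidable (Pre_remove_generic name) := by
  unfold Pre_remove_generic; infer_instance

def pvWitness_remove_generic : String := "map<int, list<str>> x"

def Spec_remove_generic (name : String) (out : String) : Prop := out = remove_generic_alt name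
instance (name : String) (out : String) : Decidable (Spec_remove_generic name out) := by
  unfold Spec_remove_generic; infer_instance

-- ===== CLAIM (what is proved, stated in full; the proofs are below) =====
def Claim_equal_remove_generic : Prop :=
  ∀ (name : String), Dom_remove_generic name → Pre_remove_generic name →
    Spec_remove_generic name (remove_generic name)

-- ===== LEMMAS AND PROOFS =====

-- signed contribution of position p under the mark vector
def dval (s : List Char) (mark : List Bool) (p : Nat) : Int :=
  if mark.getD p false then (if s.getD p ' ' = '<' then 1 else -1) else 0

-- bracket depth of the marked positions before position k
def dcount (s : List Char) (mark : List Bool) (k : Nat) : Int :=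
  ((List.range k).map (dval s mark)).sum

def rchar (s : List Char) (mark : List Bool) (k : Nat) : Char :=
  if mark.getD k false ∨ 0 < dcount s mark k then ' ' else s.getD k ' '

def render (s : List Char) (mark : List Bool) : List Char :=
  (List.range s.length).map (rchar s mark)

theorem dcount_succ (s : List Char) (mark : List Bool) (k : Nat) :
    dcount s mark (k + 1) = dcount s mark k + dval s mark k := by
  simp [dcount, List.range_succ]

-- pass 2 computes render
theorem pass2_eq (s : List Char) (mark : List Bool) (m : Nat) :
    (List.range m).foldl (stepB2 s mark) (0, []) =
      (dcount s mark m, (List.range m).map (rchar s mark)) := by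
  induction m with
  | zero => simp [dcount]
  | succ m ih =>
      rw [List.range_succ, List.foldl_append, ih, List.foldl_cons, List.foldl_nil]
      by_cases hm : mark.getD m false
      · by_cases hc : s.getD m ' ' = '<' <;>
          · simp only [List.getD] at hm hc
            simp [stepB2, hm, hc, dcount_succ, dval, rchar, List.getD, sub_eq_add_neg]
      · simp only [List.getD] at hm
        simp [stepB2, hm, dcount_succ, dval, rchar, List.getD]

def foldA (s : List Char) (m : Nat) : List Char × List Nat :=
  (List.range m).foldl (stepA s) (s, [])

def foldB (s : List Char) (m : Nat) : List Nat × List Bool :=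
  (List.range m).foldl (stepB1 s) ([], List.replicate s.length false)

def invariant (s : List Char) (m : Nat) : Prop :=
  (foldA s m).2 = (foldB s m).1 ∧
  List.Pairwise (· > ·) (foldB s m).1 ∧
  (∀ j ∈ (foldB s m).1, j < m ∧ s.getD j ' ' = '<' ∧ (foldB s m).2.getD j false = false) ∧
  (foldB s m).1.length + (s.take m).count '>' = (s.take m).count '<' ∧
  (foldB s m).2.length = s.length ∧
  (∀ p, m ≤ p → (foldB s m).2.getD p false = false) ∧
  (∀ k, 0 ≤ dcount s (foldB s m).2 k) ∧
  (foldA s m).1 = render s (foldB s m).2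

theorem foldA_succ (s : List Char) (m : Nat) :
    foldA s (m + 1) = stepA s (foldA s m) m := by
  rw [foldA, foldA, List.range_succ, List.foldl_append]; rfl

theorem foldB_succ (s : List Char) (m : Nat) :
    foldB s (m + 1) = stepB1 s (foldB s m) m := by
  rw [foldB, foldB, List.range_succ, List.foldl_append]; rfl

theorem getD_set_ne (l : List Bool) (i j : Nat) (a : Bool) (h : i ≠ j) :
    (l.set i a).getD j false = l.getD j false := by
  simp [List.getD, List.getElem?_set_ne h]

theorem getD_set_self (l : List Bool) (i : Nat) (a : Bool) (h : i < l.length) :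
    (l.set i a).getD i false = a := by
  simp [List.getD, h]

theorem range_map_getD (s : List Char) :
    (List.range s.length).map (fun k => s.getD k ' ') = s := by
  apply List.ext_getElem (by simp)
  intro i h1 h2
  simp only [List.getElem_map, List.getElem_range]
  simp [List.getD, List.getElem?_eq_getElem h2]

theorem getD_replicate_false (n p : Nat) : (List.replicate n false).getD p false = false := by
  rcases lt_or_ge p n with h | h
  · simp [List.getD, h]
  · have hl : (List.replicate n false)[p]? = none := by
      rw [List.getElem?_eq_none_iff]; simpa using h
    simp [List.getD, hl]

theorem render_nomark (s : List Char) : render s (List.replicate s.length false) = s := by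
  have hz : ∀ p, dval s (List.replicate s.length false) p = 0 := by
    intro p; rw [dval, getD_replicate_false]; simp
  have hd : ∀ k, dcount s (List.replicate s.length false) k = 0 := by
    intro k; rw [dcount, List.map_congr_left fun p _ => hz p]; simp
  have hr : ∀ k, rchar s (List.replicate s.length false) k = s.getD k ' ' := by
    intro k; rw [rchar, getD_replicate_false, hd k]; simp
  calc render s (List.replicate s.length false)
      = (List.range s.length).map (fun k => s.getD k ' ') := by
        rw [render]; exact List.map_congr_left fun k _ => hr k
    _ = s := range_map_getD s

theorem dval_set_pair (s : List Char) (mk : List Bool) (j m : Nat)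
    (hjm : j < m) (hjlen : j < mk.length) (hmlen : m < mk.length)
    (hj : mk.getD j false = false) (hm : mk.getD m false = false)
    (hsj : s.getD j ' ' = '<') (hsm : s.getD m ' ' = '>') (p : Nat) :
    dval s ((mk.set j true).set m true) p =
      dval s mk p + (if p = j then 1 else 0) + (if p = m then -1 else 0) := by
  rcases eq_or_ne p m with rfl | hpm
  · rw [dval, getD_set_self _ _ _ (by simpa using hmlen), dval, hm, hsm]
    simp [if_neg (show ¬ p = j by omega)]
  · rcases eq_or_ne p j with rfl | hpj
    · rw [dval, getD_set_ne _ _ _ _ (Ne.symm hpm), getD_set_self _ _ _ hjlen, dval, hj, hsj]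
      simp [hpm]
    · rw [dval, getD_set_ne _ _ _ _ (Ne.symm hpm), getD_set_ne _ _ _ _ (Ne.symm hpj), dval]
      simp [hpj, hpm]

theorem dcount_set_pair (s : List Char) (mk : List Bool) (j m : Nat)
    (hjm : j < m) (hjlen : j < mk.length) (hmlen : m < mk.length)
    (hj : mk.getD j false = false) (hm : mk.getD m false = false)
    (hsj : s.getD j ' ' = '<') (hsm : s.getD m ' ' = '>') (k : Nat) :
    dcount s ((mk.set j true).set m true) k =
      dcount s mk k + (if j < k then 1 else 0) - (if m < k then 1 else 0) := by
  induction k with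
  | zero => simp [dcount]
  | succ k ih =>
      rw [dcount_succ, dcount_succ, ih,
        dval_set_pair s mk j m hjm hjlen hmlen hj hm hsj hsm k]
      split_ifs <;> omega

theorem range'_split (a b c : Nat) (h : b ≤ c) :
    List.range' a c = List.range' a b ++ List.range' (a + b) (c - b) := by
  conv_lhs => rw [show c = b + (c - b) from by omega]
  rw [← List.range'_append]
  norm_num

theorem render_set_pair (s : List Char) (mk : List Bool) (j m : Nat)
    (hjm : j < m) (hmn : m < s.length) (hlen : mk.length = s.length)
    (hj : mk.getD j false = false) (hm : mk.getD m false = false)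
    (hsj : s.getD j ' ' = '<') (hsm : s.getD m ' ' = '>')
    (hdc : ∀ k, 0 ≤ dcount s mk k) :
    render s ((mk.set j true).set m true) =
      (render s mk).take j ++ List.replicate (m + 1 - j) ' ' ++ (render s mk).drop (m + 1) := by
  have hjlen : j < mk.length := by omega
  have hmlen : m < mk.length := by omega
  have hdpair := dcount_set_pair s mk j m hjm hjlen hmlen hj hm hsj hsm
  have hsplit : List.range s.length =
      List.range' 0 j ++ List.range' j (m + 1 - j) ++ List.range' (m + 1) (s.length - (m + 1)) := by
    rw [List.range_eq_range', range'_split 0 (m + 1) s.length (by omega),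
      range'_split 0 j (m + 1) (by omega)]
    norm_num
  have hrender : render s mk =
      (List.range' 0 j).map (rchar s mk) ++ (List.range' j (m + 1 - j)).map (rchar s mk) ++
        (List.range' (m + 1) (s.length - (m + 1))).map (rchar s mk) := by
    rw [render, hsplit, List.map_append, List.map_append]
  have htake : (render s mk).take j = (List.range' 0 j).map (rchar s mk) := by
    rw [hrender, List.append_assoc]
    exact List.take_left' (by simp)
  have hdrop : (render s mk).drop (m + 1) =
      (List.range' (m + 1) (s.length - (m + 1))).map (rchar s mk) := by
    rw [hrender]
    exact List.drop_left' (by simp; omega)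
  rw [htake, hdrop, render, hsplit, List.map_append, List.map_append]
  congr 1
  · congr 1
    · apply List.map_congr_left
      intro k hk
      have hkj : k < j := by
        have := List.mem_range'.mp hk; omega
      rw [rchar, rchar, getD_set_ne _ _ _ _ (by omega), getD_set_ne _ _ _ _ (by omega), hdpair k,
        if_neg (by omega : ¬ j < k), if_neg (by omega : ¬ m < k), add_zero, sub_zero]
    · rw [List.eq_replicate_iff]
      refine ⟨by simp, ?_⟩
      intro b hb
      simp only [List.mem_map] at hb
      obtain ⟨k, hk, rfl⟩ := hb
      have hkr : j ≤ k ∧ k < m + 1 := by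
        have := List.mem_range'.mp hk; omega
      rcases eq_or_ne k j with rfl | hkj
      · rw [rchar, getD_set_ne _ _ _ _ (by omega), getD_set_self _ _ _ hjlen]
        simp
      · rcases eq_or_ne k m with rfl | hkm
        · rw [rchar, getD_set_self _ _ _ (by simpa using hmlen)]
          simp
        · have hpos : (0:Int) < dcount s ((mk.set j true).set m true) k := by
            rw [hdpair k, if_pos (by omega : j < k), if_neg (by omega : ¬ m < k)]
            have := hdc k; omega
          rw [rchar, if_pos (Or.inr hpos)]
  · apply List.map_congr_left
    intro k hk
    have hkm : m + 1 ≤ k := by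
      have := List.mem_range'.mp hk; omega
    have harith : dcount s mk k + (1:Int) - 1 = dcount s mk k := by ring
    rw [rchar, rchar, getD_set_ne _ _ _ _ (by omega), getD_set_ne _ _ _ _ (by omega), hdpair k,
      if_pos (by omega : j < k), if_pos (by omega : m < k), harith]

theorem take_succ_getD (s : List Char) (m : Nat) (hm : m < s.length) :
    s.take (m + 1) = s.take m ++ [s.getD m ' '] := by
  rw [List.take_succ]
  simp [List.getD, List.getElem?_eq_getElem hm]

theorem dcount_replicate (s : List Char) (k : Nat) :
    dcount s (List.replicate s.length false) k = 0 := by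
  have hz : ∀ p, dval s (List.replicate s.length false) p = 0 := by
    intro p; rw [dval, getD_replicate_false]; simp
  rw [dcount, List.map_congr_left fun p _ => hz p]; simp

theorem main_invariant (s : List Char)
    (hpre : ∀ i ∈ List.range (s.length + 1), (s.take i).count '>' ≤ (s.take i).count '<') :
    ∀ m, m ≤ s.length → invariant s m := by
  intro m
  induction m with
  | zero =>
      intro _
      unfold invariant
      simp only [foldA, foldB, List.range_zero, List.foldl_nil]
      refine ⟨by trivial, List.Pairwise.nil, by simp, by simp, by simp, ?_, ?_, ?_⟩
      · intro p _; exact getD_replicate_false _ _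
      · intro k; rw [dcount_replicate]
      · exact (render_nomark s).symm
  | succ m ih =>
      intro hm1
      have hmn : m < s.length := by omega
      obtain ⟨h1, h2, h3, h4, h5, h6, h7, h8⟩ := ih (by omega)
      unfold invariant
      rw [foldA_succ, foldB_succ]
      have hts := take_succ_getD s m hmn
      by_cases hc1 : s.getD m ' ' = '<'
      · simp only [stepA, stepB1, hc1, reduceIte]
        refine ⟨?_, ?_, ?_, ?_, h5, ?_, h7, h8⟩
        · simp [h1]
        · exact List.pairwise_cons.mpr ⟨fun j hj => (h3 j hj).1, h2⟩
        · intro j hj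
          rcases List.mem_cons.mp hj with rfl | hj
          · exact ⟨by omega, hc1, h6 j le_rfl⟩
          · obtain ⟨ha, hb, hcc⟩ := h3 j hj; exact ⟨by omega, hb, hcc⟩
        · rw [hts]
          simp only [List.count_append]
          simp [show s[m]?.getD ' ' = '<' from hc1]
          omega
        · intro p hp; exact h6 p (by omega)
      · by_cases hc2 : s.getD m ' ' = '>'
        · -- the '>' step: Pre_ guarantees the stack is nonempty
          have hgt := hpre (m + 1) (by simp [List.mem_range]; omega)
          rw [hts] at hgt
          simp only [List.count_append] at hgt
          simp [show s[m]?.getD ' ' = '>' from hc2] at hgt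
          cases hB : (foldB s m).1 with
          | nil => exfalso; rw [hB] at h4; simp at h4; omega
          | cons j rest =>
            have hA2 : (foldA s m).2 = j :: rest := h1.trans hB
            have hjmem : j ∈ (foldB s m).1 := by rw [hB]; exact List.mem_cons_self
            obtain ⟨hjm, hsj, hjmk⟩ := h3 j hjmem
            have hmmk : (foldB s m).2.getD m false = false := h6 m le_rfl
            have hjlen : j < (foldB s m).2.length := by omega
            have hmlen : m < (foldB s m).2.length := by omega
            have hpw := List.pairwise_cons.mp (hB ▸ h2)
            simp only [stepA, stepB1, hc2, hA2, hB,
              if_neg (show ¬ ('>':Char) = '<' from by decide), reduceIte]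
            refine ⟨by trivial, hpw.2, ?_, ?_, by simp [h5], ?_, ?_, ?_⟩
            · intro j' hj'
              obtain ⟨ha, hb, hcc⟩ := h3 j' (by rw [hB]; exact List.mem_cons_of_mem _ hj')
              have hne : j ≠ j' := by have := hpw.1 j' hj'; omega
              refine ⟨by omega, hb, ?_⟩
              rw [getD_set_ne _ _ _ _ (by omega), getD_set_ne _ _ _ _ hne]
              exact hcc
            · rw [hts]
              simp only [List.count_append]
              rw [hB] at h4
              simp [show s[m]?.getD ' ' = '>' from hc2] at h4 ⊢
              omega
            · intro p hp
              rw [getD_set_ne _ _ _ _ (by omega), getD_set_ne _ _ _ _ (by omega)]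
              exact h6 p (by omega)
            · intro k
              rw [dcount_set_pair s _ j m hjm hjlen hmlen hjmk hmmk hsj hc2 k]
              have := h7 k
              split_ifs <;> omega
            · rw [h8]
              exact (render_set_pair s _ j m hjm hmn h5 hjmk hmmk hsj hc2 h7).symm
        · simp only [stepA, stepB1, if_neg hc1, if_neg hc2]
          refine ⟨h1, h2, ?_, ?_, h5, ?_, h7, h8⟩
          · intro j hj
            obtain ⟨ha, hb, hcc⟩ := h3 j hj
            exact ⟨by omega, hb, hcc⟩
          · rw [hts]
            simp only [List.count_append]
            simp [show ¬ s[m]?.getD ' ' = '<' from hc1, show ¬ s[m]?.getD ' ' = '>' from hc2]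
            omega
          · intro p hp; exact h6 p (by omega)

-- ===== VERDICT (by name: the statement is the Claim_ definition above) =====
theorem remove_generic_spec : Claim_equal_remove_generic := by
  intro name _ hpre
  unfold Spec_remove_generic remove_generic remove_generic_alt
  have h := main_invariant name.toList hpre name.toList.length le_rfl
  unfold invariant at h
  obtain ⟨-, -, -, -, -, -, -, h8⟩ := h
  rw [foldA, foldB] at h8
  simp only [pass2_eq, render, String.length_toList] at h8 ⊢
  rw [h8]
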